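-- pv_equiv track=rewrite | github.com/MFalappa/Molabeach3 | classes/analysisClasses/analysis_data_type_class.py | returnStringBorder
-- ===== SOURCE A (Python) =====
-- def returnStringBorder(line):
--     listBorder = []
--     listStart = []
--     ch_st = ''
--     ind = 0
--     for ch in line:
--         if ch == '"':
--             if len(listStart):
--                 if ch == ch_st:
--                     listBorder += [(listStart.pop(-1),ind+1)]
--             else:
--                 listStart = [ind]
--                 ch_st = ch
--         elif ch == "'":
--             if len(listStart):
--                 if ch == ch_st:
--                     listBorder += [(listStart.pop(-1),ind+1)]
--             else:
--                 listStart = [ind]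
--                 ch_st = ch
--         ind += 1
--     return listBorder
-- ===== SOURCE B (Python) =====
-- def returnStringBorder(line):
--     # find/jump loop: leap between quote positions instead of scanning every char
--     res = []
--     pos = 0
--     while True:
--         cand = [i for i in (line.find('"', pos), line.find("'", pos)) if i != -1]
--         if not cand:
--             break
--         i = min(cand)
--         j = line.find(line[i], i + 1)
--         if j == -1:
--             break
--         res.append((i, j + 1))
--         pos = j + 1
--     return res
-- ===== Notes on version B (the rewrite author's own statement) =====
-- stated objective: faster
-- what changed: Replaced the per-character state machine (open-quote list + remembered quote char) with a find/jump loop that leaps between quote positions: locate the earliest quote at/after a cursor with str.find, find its matching partner with str.find, emit the span, and jump the cursor past it.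
import Mathlib
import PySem

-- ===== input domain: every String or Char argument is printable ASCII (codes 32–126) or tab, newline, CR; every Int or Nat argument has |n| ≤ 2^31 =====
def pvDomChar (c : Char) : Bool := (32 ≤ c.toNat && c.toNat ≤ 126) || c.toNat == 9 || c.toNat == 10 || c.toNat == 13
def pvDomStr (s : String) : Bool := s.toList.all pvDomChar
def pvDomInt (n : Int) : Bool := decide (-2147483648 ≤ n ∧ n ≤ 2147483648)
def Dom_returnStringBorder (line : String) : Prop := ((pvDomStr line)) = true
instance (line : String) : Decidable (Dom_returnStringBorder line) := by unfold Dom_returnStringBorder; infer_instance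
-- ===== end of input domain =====

-- B replaces A's per-character open-quote state machine with a find/jump loop over quote
-- positions (objective: faster; a timing run measured B faster at the largest sizes).

-- ===== PORT A =====
-- A's for-loop over the characters; Python's ch_st starts as '' and only ever holds a
-- quote character afterwards: ported as Option Char (none = '').
def pvGoA : List Char → List (Int × Int) → List Int → Option Char → Int → List (Int × Int)
  | [], border, _, _, _ => border
  | c :: cs, border, start, chst, ind =>
    if c = '"' then
      if start.length ≠ 0 then
        if some c = chst then
          pvGoA cs (border ++ [(start.getLastD 0, ind + 1)]) start.dropLast chst (ind + 1)
        else pvGoA cs border start chst (ind + 1)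
      else pvGoA cs border [ind] (some c) (ind + 1)
    else if c = '\'' then
      if start.length ≠ 0 then
        if some c = chst then
          pvGoA cs (border ++ [(start.getLastD 0, ind + 1)]) start.dropLast chst (ind + 1)
        else pvGoA cs border start chst (ind + 1)
      else pvGoA cs border [ind] (some c) (ind + 1)
    else pvGoA cs border start chst (ind + 1)

def returnStringBorder (line : String) : List (Int × Int) :=
  pvGoA line.toList [] [] none 0

-- ===== PORT B =====
-- Source B's while-loop; the fuel argument only makes the recursion total (each iteration
-- moves the cursor pos forward, so length+1 steps always suffice).
def pvGoB (line : String) : Nat → Int → List (Int × Int) → List (Int × Int)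
  | 0, _, res => res
  | fuel + 1, pos, res =>
    let cand := [PySem.Str.findFrom line "\"" pos, PySem.Str.findFrom line "'" pos].filter (· != -1)
    match PySem.List.min? cand (fun x => x) with
    | none => res              -- if not cand: break
    | some i =>
      match PySem.Str.pyGet? line i with
      | none => res            -- unreachable: i is an index returned by find, hence in range
      | some qc =>
        let j := PySem.Str.findFrom line (String.ofList [qc]) (i + 1)
        if j = -1 then res
        else pvGoB line fuel (j + 1) (res ++ [(i, j + 1)])

def returnStringBorder_alt (line : String) : List (Int × Int) :=
  pvGoB line (line.toList.length + 1) 0 []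

-- ===== PRECONDITION & SPEC =====
def Spec_returnStringBorder (line : String) (out : List (Int × Int)) : Prop := out = returnStringBorder_alt line
instance (line : String) (out : List (Int × Int)) : Decidable (Spec_returnStringBorder line out) := by unfold Spec_returnStringBorder; infer_instance

-- ===== CLAIM (what is proved, stated in full; the proofs are below) =====
def Claim_equal_returnStringBorder : Prop := ∀ (line : String), Dom_returnStringBorder line → Spec_returnStringBorder line (returnStringBorder line)

-- ===== LEMMAS AND PROOFS =====

-- first index of the character q in s
def pvIdxC : List Char → Char → Option Nat
  | [], _ => none
  | c :: cs, q => if c = q then some 0 else (pvIdxC cs q).map (· + 1)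

-- first index of either quote character, together with that character
def pvIdxQ : List Char → Option (Nat × Char)
  | [] => none
  | c :: cs => if c = '"' ∨ c = '\'' then some (0, c) else (pvIdxQ cs).map (fun p => (p.1 + 1, p.2))

theorem pvIdxC_none (s : List Char) (q : Char) (h : pvIdxC s q = none) : q ∉ s := by
  induction s with
  | nil => simp
  | cons c cs ih =>
    by_cases hc : c = q <;> simp [pvIdxC, hc] at h ⊢
    exact ⟨fun e => hc e.symm, ih h⟩

theorem pvIdxC_some (s : List Char) (q : Char) (k : Nat) (h : pvIdxC s q = some k) :
    s[k]? = some q ∧ ∀ i < k, s[i]? ≠ some q := by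
  induction s generalizing k with
  | nil => simp [pvIdxC] at h
  | cons c cs ih =>
    by_cases hc : c = q <;> simp [pvIdxC, hc] at h
    · subst hc; subst h; simp
    · obtain ⟨a, ha, rfl⟩ := h
      obtain ⟨h1, h2⟩ := ih a ha
      refine ⟨by simpa using h1, ?_⟩
      intro i hi
      cases i with
      | zero => simpa using fun e => hc e
      | succ i' => simpa using h2 i' (by omega)

theorem pvIdxQ_some (s : List Char) (k : Nat) (q : Char) (h : pvIdxQ s = some (k, q)) :
    s[k]? = some q ∧ (q = '"' ∨ q = '\'') := by
  induction s generalizing k with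
  | nil => simp [pvIdxQ] at h
  | cons c cs ih =>
    by_cases hc : c = '"' ∨ c = '\'' <;> simp [pvIdxQ, hc] at h
    · obtain ⟨rfl, rfl⟩ := h; simpa using hc
    · obtain ⟨a, hab, rfl⟩ := h
      obtain ⟨h1, h2⟩ := ih a hab
      exact ⟨by simpa using h1, h2⟩

-- pvIdxQ is the merge (earliest) of the two single-character searches
theorem pvIdxQ_merge (s : List Char) :
    pvIdxQ s =
      match pvIdxC s '"', pvIdxC s '\'' with
      | none, none => none
      | some a, none => some (a, '"')
      | none, some b => some (b, '\'')
      | some a, some b => if a ≤ b then some (a, '"') else some (b, '\'') := by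
  induction s with
  | nil => simp [pvIdxQ, pvIdxC]
  | cons c cs ih =>
    by_cases h1 : c = '"'
    · subst h1
      rcases hb : pvIdxC cs '\'' with _ | b <;>
        simp [pvIdxQ, pvIdxC, hb]
    · by_cases h2 : c = '\''
      · subst h2
        rcases ha : pvIdxC cs '"' with _ | a <;>
          simp [pvIdxQ, pvIdxC, h1, ha]
      · rw [show pvIdxQ (c :: cs) = (pvIdxQ cs).map (fun p => (p.1 + 1, p.2)) by
          simp [pvIdxQ, h1, h2], ih]
        rcases ha : pvIdxC cs '"' with _ | a <;>
          rcases hb : pvIdxC cs '\'' with _ | b <;>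
            simp [pvIdxC, h1, h2, ha, hb]
        by_cases hab : a ≤ b <;> simp [hab]

theorem pvSingPrefix (q : Char) (l : List Char) : [q] <+: l ↔ l[0]? = some q := by
  cases l with
  | nil => simp
  | cons x xs => simp [List.cons_prefix_cons, eq_comm]

-- single-character find = pvIdxC
theorem pvFind_single (s : List Char) (q : Char) :
    PySem.Chars.find s [q] =
      match pvIdxC s q with
      | none => -1
      | some k => (k : Int) := by
  rcases hx : pvIdxC s q with _ | k
  · have hnot : q ∉ s := pvIdxC_none s q hx
    simp [PySem.Chars.find_eq_neg_one_iff, List.singleton_infix_iff, hnot]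
  · show PySem.Chars.find s [q] = (k : Int)
    obtain ⟨h1, h2⟩ := pvIdxC_some s q k hx
    have charat : ∀ i : Nat, ([q] <+: s.drop i) ↔ s[i]? = some q := by
      intro i; rw [pvSingPrefix]; simp [List.getElem?_drop]
    have hpos : 0 ≤ PySem.Chars.find s [q] := by
      rw [PySem.Chars.find_nonneg_iff, List.singleton_infix_iff]
      exact List.mem_of_getElem? h1
    obtain ⟨hp, hmin⟩ := PySem.Chars.find_spec (s := s) (sub := [q]) hpos
    have ht : s[(PySem.Chars.find s [q]).toNat]? = some q := (charat _).mp hp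
    have hk1 : ¬ ((PySem.Chars.find s [q]).toNat < k) := fun hlt => h2 _ hlt ht
    have hk2 : ¬ (k < (PySem.Chars.find s [q]).toNat) := fun hlt => hmin _ hlt ((charat k).mpr h1)
    omega

-- A's machine with no open quote scans to the next quote of either kind
theorem pvA_scan (cs : List Char) (border : List (Int × Int)) (chst : Option Char) (ind : Int) :
    pvGoA cs border [] chst ind =
      match pvIdxQ cs with
      | none => border
      | some (k, q) => pvGoA (cs.drop (k + 1)) border [ind + k] (some q) (ind + (k : Int) + 1) := by
  induction cs generalizing ind with
  | nil => simp [pvGoA, pvIdxQ]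
  | cons c cs ih =>
    by_cases h1 : c = '"'
    · subst h1; simp [pvGoA, pvIdxQ]
    · by_cases h2 : c = '\''
      · subst h2; simp [pvGoA, pvIdxQ, h1]
      · rw [show pvGoA (c :: cs) border [] chst ind = pvGoA cs border [] chst (ind + 1) by
          simp [pvGoA, h1, h2]]
        rw [ih (ind + 1)]
        rcases hq : pvIdxQ cs with _ | ⟨k, q⟩ <;>
          simp only [pvIdxQ, h1, h2, or_self, hq, Option.map_none, Option.map_some]
        · simp
        · simp only [if_false, List.drop_succ_cons]
          push_cast
          ring_nf

-- A's machine with an open quote q scans to the next q, emitting the pair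
theorem pvA_close (cs : List Char) (border : List (Int × Int)) (s : Int) (q : Char)
    (hq : q = '"' ∨ q = '\'') (ind : Int) :
    pvGoA cs border [s] (some q) ind =
      match pvIdxC cs q with
      | none => border
      | some k => pvGoA (cs.drop (k + 1)) (border ++ [(s, ind + (k : Int) + 1)]) [] (some q) (ind + (k : Int) + 1) := by
  induction cs generalizing border ind with
  | nil => simp [pvGoA, pvIdxC]
  | cons c cs ih =>
    by_cases hcq : c = q
    · subst hcq
      rcases hq with hq | hq <;> subst hq <;>
        simp [pvGoA, pvIdxC]
    · have hskip : pvGoA (c :: cs) border [s] (some q) ind = pvGoA cs border [s] (some q) (ind + 1) := by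
        by_cases h1 : c = '"' <;> by_cases h2 : c = '\'' <;>
          simp_all [pvGoA]
      rw [hskip, ih border (ind + 1)]
      rcases hk : pvIdxC cs q with _ | k <;>
        simp only [pvIdxC, hcq, hk, Option.map_none, Option.map_some]
      · rfl
      · simp only [if_false, List.drop_succ_cons]
        push_cast
        ring_nf

-- s.find(q, p) for a single character q, through pvIdxC on the dropped suffix
theorem pvFindFrom (line : String) (q : Char) (p : Nat) (hp : p ≤ line.toList.length) :
    PySem.Str.findFrom line (String.ofList [q]) (p : Int) =
      match pvIdxC (line.toList.drop p) q with
      | none => -1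
      | some k => ((p + k : Nat) : Int) := by
  rw [PySem.Str.findFrom_eq]
  have h := PySem.Chars.findFrom_natCast line.toList [q] p hp
  rw [show (String.ofList [q]).toList = [q] from String.toList_ofList, h, pvFind_single]
  rcases hx : pvIdxC (line.toList.drop p) q with _ | k <;> simp

-- one iteration of B's loop, expressed through pvIdxQ / pvIdxC
theorem pvB_step (line : String) (fuel : Nat) (p : Nat) (res : List (Int × Int))
    (hp : p ≤ line.toList.length) :
    pvGoB line (fuel + 1) (p : Int) res =
      match pvIdxQ (line.toList.drop p) with
      | none => res
      | some (k, q) =>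
        match pvIdxC (line.toList.drop (p + k + 1)) q with
        | none => res
        | some m => pvGoB line fuel ((p + k + m + 2 : Nat) : Int) (res ++ [(((p + k : Nat) : Int), ((p + k + m + 2 : Nat) : Int))]) := by
  have e1 : ("\"" : String) = String.ofList ['"'] := rfl
  have e2 : ("'" : String) = String.ofList ['\''] := rfl
  simp only [pvGoB, e1, e2, pvFindFrom line _ p hp]
  rcases ha : pvIdxC (line.toList.drop p) '"' with _ | a <;>
    rcases hb : pvIdxC (line.toList.drop p) '\'' with _ | b <;>
      rw [pvIdxQ_merge (line.toList.drop p), ha, hb]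
  · simp [PySem.List.min?]
  · -- only a ' was found
    have hget : line.toList[p + b]? = some '\'' := by
      have := (pvIdxC_some _ _ _ hb).1; rwa [List.getElem?_drop] at this
    have hlt : p + b < line.toList.length := (List.getElem?_eq_some_iff.mp hget).1
    have hne : (((p + b : Nat) : Int) != -1) = true := by simp; omega
    simp only [List.filter_cons, List.filter_nil, hne, if_true,
      show ((-1 : Int) != -1) = false from rfl, if_false, Bool.false_eq_true,
      PySem.List.min?_id_cons, List.foldl_nil]
    simp only [PySem.Str.pyGet?_natCast, hget]
    rw [show ((p + b : Nat) : Int) + 1 = ((p + b + 1 : Nat) : Int) by push_cast; ring]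
    rw [pvFindFrom line '\'' (p + b + 1) (by omega)]
    rcases hm : pvIdxC (line.toList.drop (p + b + 1)) '\'' with _ | m
    · simp
    · have hne2 : ¬ (((p + b + 1 + m : Nat) : Int) = -1) := by omega
      rw [if_neg hne2]
      rw [show ((p + b + 1 + m : Nat) : Int) + 1 = ((p + b + m + 2 : Nat) : Int) by push_cast; ring]
  · -- only a " was found
    have hget : line.toList[p + a]? = some '"' := by
      have := (pvIdxC_some _ _ _ ha).1; rwa [List.getElem?_drop] at this
    have hlt : p + a < line.toList.length := (List.getElem?_eq_some_iff.mp hget).1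
    have hne : (((p + a : Nat) : Int) != -1) = true := by simp; omega
    simp only [List.filter_cons, List.filter_nil, hne, if_true,
      show ((-1 : Int) != -1) = false from rfl, if_false, Bool.false_eq_true,
      PySem.List.min?_id_cons, List.foldl_nil]
    simp only [PySem.Str.pyGet?_natCast, hget]
    rw [show ((p + a : Nat) : Int) + 1 = ((p + a + 1 : Nat) : Int) by push_cast; ring]
    rw [pvFindFrom line '"' (p + a + 1) (by omega)]
    rcases hm : pvIdxC (line.toList.drop (p + a + 1)) '"' with _ | m
    · simp
    · have hne2 : ¬ (((p + a + 1 + m : Nat) : Int) = -1) := by omega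
      rw [if_neg hne2]
      rw [show ((p + a + 1 + m : Nat) : Int) + 1 = ((p + a + m + 2 : Nat) : Int) by push_cast; ring]
  · -- both kinds found: take the earlier one
    have hgetA : line.toList[p + a]? = some '"' := by
      have := (pvIdxC_some _ _ _ ha).1; rwa [List.getElem?_drop] at this
    have hgetB : line.toList[p + b]? = some '\'' := by
      have := (pvIdxC_some _ _ _ hb).1; rwa [List.getElem?_drop] at this
    have hltA : p + a < line.toList.length := (List.getElem?_eq_some_iff.mp hgetA).1
    have hltB : p + b < line.toList.length := (List.getElem?_eq_some_iff.mp hgetB).1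
    have hneA : (((p + a : Nat) : Int) != -1) = true := by simp; omega
    have hneB : (((p + b : Nat) : Int) != -1) = true := by simp; omega
    have hab' : a ≠ b := by
      intro h; rw [h] at hgetA; rw [hgetA] at hgetB; exact absurd (Option.some.inj hgetB) (by decide)
    simp only [List.filter_cons, List.filter_nil, hneA, hneB, if_true,
      PySem.List.min?_id_cons, List.foldl_cons, List.foldl_nil]
    by_cases hab : a ≤ b
    · rw [if_pos hab]
      rw [show min ((p + a : Nat) : Int) ((p + b : Nat) : Int) = ((p + a : Nat) : Int) by omega]
      simp only [PySem.Str.pyGet?_natCast, hgetA]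
      rw [show ((p + a : Nat) : Int) + 1 = ((p + a + 1 : Nat) : Int) by push_cast; ring]
      rw [pvFindFrom line '"' (p + a + 1) (by omega)]
      rcases hm : pvIdxC (line.toList.drop (p + a + 1)) '"' with _ | m
      · simp
      · have hne2 : ¬ (((p + a + 1 + m : Nat) : Int) = -1) := by omega
        rw [if_neg hne2]
        rw [show ((p + a + 1 + m : Nat) : Int) + 1 = ((p + a + m + 2 : Nat) : Int) by push_cast; ring]
    · rw [if_neg hab]
      rw [show min ((p + a : Nat) : Int) ((p + b : Nat) : Int) = ((p + b : Nat) : Int) by omega]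
      simp only [PySem.Str.pyGet?_natCast, hgetB]
      rw [show ((p + b : Nat) : Int) + 1 = ((p + b + 1 : Nat) : Int) by push_cast; ring]
      rw [pvFindFrom line '\'' (p + b + 1) (by omega)]
      rcases hm : pvIdxC (line.toList.drop (p + b + 1)) '\'' with _ | m
      · simp
      · have hne2 : ¬ (((p + b + 1 + m : Nat) : Int) = -1) := by omega
        rw [if_neg hne2]
        rw [show ((p + b + 1 + m : Nat) : Int) + 1 = ((p + b + m + 2 : Nat) : Int) by push_cast; ring]

-- master equivalence: from any cursor position, B's jump loop equals A's machine on the suffix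
theorem pvMaster (line : String) (fuel : Nat) (p : Nat) (res : List (Int × Int)) (chst : Option Char)
    (hp : p ≤ line.toList.length) (hf : line.toList.length - p < fuel) :
    pvGoB line fuel (p : Int) res = pvGoA (line.toList.drop p) res [] chst (p : Int) := by
  induction fuel generalizing p res chst with
  | zero => omega
  | succ n ih =>
    rw [pvB_step line n p res hp, pvA_scan]
    rcases hq : pvIdxQ (line.toList.drop p) with _ | ⟨k, q⟩
    · rfl
    · obtain ⟨hgk, hquote⟩ := pvIdxQ_some _ _ _ hq
      dsimp only
      have hgk' : line.toList[p + k]? = some q := by rwa [List.getElem?_drop] at hgk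
      have hlt : p + k < line.toList.length := (List.getElem?_eq_some_iff.mp hgk').1
      rw [List.drop_drop, show p + (k + 1) = p + k + 1 from rfl,
        pvA_close _ _ _ _ hquote]
      rcases hm : pvIdxC (line.toList.drop (p + k + 1)) q with _ | m
      · rfl
      · dsimp only
        have hgm : line.toList[p + k + 1 + m]? = some q := by
            have := (pvIdxC_some _ _ _ hm).1; rwa [List.getElem?_drop] at this
        have hltm : p + k + 1 + m < line.toList.length := (List.getElem?_eq_some_iff.mp hgm).1
        rw [ih (p + k + m + 2) (res ++ [(((p + k : Nat) : Int), ((p + k + m + 2 : Nat) : Int))])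
          (some q) (by omega) (by omega)]
        rw [List.drop_drop, show p + k + 1 + (m + 1) = p + k + m + 2 from by omega]
        push_cast
        ring_nf

-- ===== VERDICT (by name: the statement is the Claim_ definition above) =====
theorem returnStringBorder_spec : Claim_equal_returnStringBorder := by
  intro line _
  unfold Spec_returnStringBorder returnStringBorder returnStringBorder_alt
  have := pvMaster line (line.toList.length + 1) 0 [] none (by omega) (by omega)
  simpa using this.symm
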